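-- pv_equiv track=rewrite | github.com/forwardnetworks/forward-netbox | forward_netbox/api/views.py | _query_parent_directories
-- ===== SOURCE A (Python) =====
-- def _query_parent_directories(query_path):
--     parts = [part for part in str(query_path or "").strip("/").split("/")[:-1] if part]
--     directories = ["/"]
--     current = ""
--     for part in parts:
--         current = f"{current}/{part}"
--         directories.append(f"{current}/")
--     return directories
-- ===== SOURCE B (Python) =====
-- def _query_parent_directories(query_path):
--     parts = [part for part in str(query_path or "").strip("/").split("/")[:-1] if part]
--     return ["/"] + ["/" + "/".join(parts[:i]) + "/" for i in range(1, len(parts) + 1)]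
-- ===== Notes on version B (the rewrite author's own statement) =====
-- stated objective: simpler
-- what changed: Replaces the mutable running-prefix accumulator loop with a direct slice-and-join formulation: each parent directory is computed independently by joining the first i path parts with slashes.
import Mathlib
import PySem

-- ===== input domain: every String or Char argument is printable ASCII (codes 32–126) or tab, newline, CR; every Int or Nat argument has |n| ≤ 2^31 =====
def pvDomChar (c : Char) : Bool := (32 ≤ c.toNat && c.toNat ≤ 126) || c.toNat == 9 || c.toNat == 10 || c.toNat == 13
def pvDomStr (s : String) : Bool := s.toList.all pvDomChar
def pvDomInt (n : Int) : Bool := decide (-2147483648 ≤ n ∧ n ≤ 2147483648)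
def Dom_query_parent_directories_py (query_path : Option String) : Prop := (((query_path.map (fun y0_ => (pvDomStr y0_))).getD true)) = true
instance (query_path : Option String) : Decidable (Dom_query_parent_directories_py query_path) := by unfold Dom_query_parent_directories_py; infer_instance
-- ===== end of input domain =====

-- B drops A's mutable running-prefix accumulator: each parent directory is recomputed
-- independently by slash-joining the first i path parts (simpler decomposition, same results).

-- shared helper: parts = [part for part in str(query_path or "").strip("/").split("/")[:-1] if part]
def pvParts (query_path : Option String) : List (List Char) :=
  (PySem.List.slice
      (PySem.Chars.splitOn (PySem.Chars.stripChars (query_path.getD "").toList ['/']) ['/'])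
      none (some (-1))).filter (fun p => p ≠ [])

-- ===== PORT A =====
def query_parent_directories_py (query_path : Option String) : List String :=
  (((pvParts query_path).foldl
      (fun (st : List String × List Char) part =>
        let current := st.2 ++ '/' :: part
        (st.1 ++ [String.ofList (current ++ ['/'])], current))
      (["/"], [])) ).1

-- ===== PORT B =====
def query_parent_directories_py_alt (query_path : Option String) : List String :=
  "/" :: (PySem.List.pyRange 1 (((pvParts query_path).length : Int) + 1) 1).map
      (fun i => String.ofList
        ('/' :: PySem.Chars.join ['/'] (PySem.List.slice (pvParts query_path) none (some i)) ++ ['/']))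

-- ===== PRECONDITION & SPEC =====
def Spec_query_parent_directories_py (query_path : Option String) (out : List String) : Prop := out = query_parent_directories_py_alt query_path
instance (query_path : Option String) (out : List String) : Decidable (Spec_query_parent_directories_py query_path out) := by unfold Spec_query_parent_directories_py; infer_instance

-- ===== CLAIM (what is proved, stated in full; the proofs are below) =====
def Claim_equal_query_parent_directories_py : Prop := ∀ (query_path : Option String), Dom_query_parent_directories_py query_path → Spec_query_parent_directories_py query_path (query_parent_directories_py query_path)

-- ===== LEMMAS AND PROOFS =====

-- incremental spec of A's loop body, as a structural recursion
def pvG (cur : List Char) : List (List Char) → List String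
  | [] => []
  | p :: ps => String.ofList (cur ++ '/' :: p ++ ['/']) :: pvG (cur ++ '/' :: p) ps

-- '/'-prefixed concatenation of a list of parts
def pvPref (xs : List (List Char)) : List Char := (xs.map (fun p => '/' :: p)).flatten

lemma pvPref_eq_join (xs : List (List Char)) (h : xs ≠ []) :
    pvPref xs = '/' :: PySem.Chars.join ['/'] xs := by
  induction xs with
  | nil => simp at h
  | cons p ps ih =>
    cases ps with
    | nil => rw [PySem.Chars.join_singleton]; simp [pvPref]
    | cons q qs =>
      simp only [pvPref] at ih ⊢
      rw [PySem.Chars.join_cons_cons]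
      simp only [List.map_cons, List.flatten_cons] at ih ⊢
      rw [ih (by simp)]
      simp

lemma foldlA (parts : List (List Char)) (st : List String × List Char) :
    (parts.foldl
      (fun (st : List String × List Char) part =>
        let current := st.2 ++ '/' :: part
        (st.1 ++ [String.ofList (current ++ ['/'])], current))
      st).1 = st.1 ++ pvG st.2 parts := by
  induction parts generalizing st with
  | nil => simp [pvG]
  | cons p ps ih =>
    rw [List.foldl_cons, ih, pvG]
    simp

lemma pvG_eq_map (parts : List (List Char)) (acc : List (List Char)) :
    pvG (pvPref acc) parts =
      (List.range parts.length).map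
        (fun i => String.ofList (pvPref (acc ++ parts.take (i + 1)) ++ ['/'])) := by
  induction parts generalizing acc with
  | nil => simp [pvG]
  | cons p ps ih =>
    have h1 : pvPref acc ++ '/' :: p = pvPref (acc ++ [p]) := by
      simp [pvPref]
    simp only [pvG, List.length_cons, List.range_succ_eq_map, List.map_cons, List.map_map]
    congr 1
    · simp [pvPref]
    · rw [h1, ih (acc ++ [p])]
      apply List.map_congr_left
      intro i _
      simp [List.append_assoc]

lemma range_map_pyRange (n : Nat) (f : Int → String) :
    (PySem.List.pyRange 1 ((n : Int) + 1) 1).map f =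
      (List.range n).map (fun (k : Nat) => f (1 + (k : Int))) := by
  rw [PySem.List.pyRange_one]
  have h : (((n : Int) + 1) - 1).toNat = n := by omega
  rw [h, List.map_map]
  simp [Function.comp]

-- ===== VERDICT (by name: the statement is the Claim_ definition above) =====
theorem query_parent_directories_py_spec : Claim_equal_query_parent_directories_py := by
  intro query_path _hdom
  unfold Spec_query_parent_directories_py query_parent_directories_py query_parent_directories_py_alt
  generalize pvParts query_path = parts
  rw [foldlA]
  have hA : pvG [] parts = pvG (pvPref []) parts := by simp [pvPref]
  rw [show (["/"], ([] : List Char)).1 = ["/"] from rfl,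
      show (["/"], ([] : List Char)).2 = ([] : List Char) from rfl,
      hA, pvG_eq_map parts [], range_map_pyRange parts.length]
  have h : ∀ k ∈ List.range parts.length,
      String.ofList (pvPref ([] ++ parts.take (k + 1)) ++ ['/']) =
      String.ofList ('/' :: PySem.Chars.join ['/']
        (PySem.List.slice parts none (some (1 + (k : Int)))) ++ ['/']) := by
    intro k hk
    simp only [List.mem_range] at hk
    have hslice : PySem.List.slice parts none (some (1 + (k : Int))) = parts.take (k + 1) := by
      rw [PySem.List.slice_to parts (hb := by omega)]
      congr 1
      omega
    rw [hslice, List.nil_append,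
        pvPref_eq_join _ (by
          have hlen : (parts.take (k + 1)).length = k + 1 := by
            rw [List.length_take]; omega
          intro h; rw [h] at hlen; simp at hlen)]
  rw [List.map_congr_left h]
  rfl
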